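-- pv_equiv track=rewrite | github.com/trans/agpt | rnd/p2s-attention/proto/p2s_train.py | path_tokens
-- ===== SOURCE A (Python) =====
-- def path_tokens(node_id, parent, edge):
--     """Walk parent chain back to root collecting edge tokens (root->leaf order)."""
--     segments = []
--     cur = node_id
--     while cur > 0:
--         e = edge[cur]
--         if e is not None:
--             segments.append(e)
--         p = parent[cur]
--         if p is None:
--             break
--         cur = p
--     out = []
--     for seg in reversed(segments):
--         out.extend(seg)
--     return out
-- ===== SOURCE B (Python) =====
-- def path_tokens(node_id, parent, edge):
--     """Collect edge tokens along the parent chain, emitting in root->leaf order directly."""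
--     out = []
--
--     def rec(cur):
--         p = parent[cur]
--         if p is not None and p > 0:
--             rec(p)
--         e = edge[cur]
--         if e is not None:
--             out.extend(e)
--
--     if node_id > 0:
--         rec(node_id)
--     return out
-- ===== Notes on version B (the rewrite author's own statement) =====
-- stated objective: alternative
-- what changed: Replaced the leaf-to-root loop that buffers segments and then flattens them via reversed() with a direct recursion on the parent chain that recurses into the parent first and so emits each node's edge tokens in root-to-leaf order with no buffer and no reversal pass.
import Mathlib
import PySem

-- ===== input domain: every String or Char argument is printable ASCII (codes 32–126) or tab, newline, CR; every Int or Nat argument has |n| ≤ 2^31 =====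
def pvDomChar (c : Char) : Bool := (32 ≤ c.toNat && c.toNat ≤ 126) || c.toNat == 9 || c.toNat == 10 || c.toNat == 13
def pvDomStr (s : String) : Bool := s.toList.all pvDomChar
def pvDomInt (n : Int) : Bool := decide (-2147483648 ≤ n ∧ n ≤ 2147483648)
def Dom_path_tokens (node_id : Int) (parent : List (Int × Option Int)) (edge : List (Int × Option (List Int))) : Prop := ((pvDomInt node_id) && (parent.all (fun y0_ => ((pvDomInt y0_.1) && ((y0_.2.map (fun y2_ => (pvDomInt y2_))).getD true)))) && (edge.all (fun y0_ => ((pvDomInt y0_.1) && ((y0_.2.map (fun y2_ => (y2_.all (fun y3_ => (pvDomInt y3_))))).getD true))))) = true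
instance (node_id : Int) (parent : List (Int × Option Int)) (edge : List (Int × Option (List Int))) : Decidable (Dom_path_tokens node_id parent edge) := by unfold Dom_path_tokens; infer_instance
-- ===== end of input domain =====

-- B replaces A's buffer-segments-then-reverse loop with a recursion that visits the parent first
-- and emits tokens directly in root-to-leaf order (objective: alternative decomposition, same cost).


-- ===== PORT A =====
-- the while loop of A; fuel = parent.length + 1 is only a totality guard: on every input
-- admitted by Pre_ the chain stops strictly before the fuel runs out (see Pre_ below).
-- KeyError branches (lookup = none) return the current state; Pre_ excludes those inputs.
def pathLoopA (parent : List (Int × Option Int)) (edge : List (Int × Option (List Int))) : Nat → Int → List (List Int) → List (List Int)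
  | fuel, cur, segments =>
    if cur > 0 then
      match fuel with
      | 0 => segments
      | fuel' + 1 =>
        match (PySem.Dict.mk edge).get? cur with
        | none => segments            -- KeyError: outside Pre_
        | some e =>
          let segments' := match e with
            | some s => segments ++ [s]
            | none => segments
          match (PySem.Dict.mk parent).get? cur with
          | none => segments'         -- KeyError: outside Pre_
          | some none => segments'    -- break
          | some (some p) => pathLoopA parent edge fuel' p segments'
    else segments

def path_tokens (node_id : Int) (parent : List (Int × Option Int)) (edge : List (Int × Option (List Int))) : List Int :=
  let segments := pathLoopA parent edge (parent.length + 1) node_id []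
  segments.reverse.foldl (fun out seg => out ++ seg) []

-- ===== PORT B =====
-- the inner rec of B; same fuel guard as above (never exhausted inside Pre_).
def pathRecB (parent : List (Int × Option Int)) (edge : List (Int × Option (List Int))) : Nat → Int → List Int
  | fuel, cur =>
    match fuel with
    | 0 => []
    | fuel' + 1 =>
      let pre : List Int :=
        match (PySem.Dict.mk parent).get? cur with
        | some (some p) => if p > 0 then pathRecB parent edge fuel' p else []
        | _ => []
      let mine : List Int :=
        match (PySem.Dict.mk edge).get? cur with
        | some (some e) => e
        | _ => []
      pre ++ mine

def path_tokens_alt (node_id : Int) (parent : List (Int × Option Int)) (edge : List (Int × Option (List Int))) : List Int :=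
  if node_id > 0 then pathRecB parent edge (parent.length + 1) node_id else []

-- ===== PRECONDITION & SPEC =====
-- Pre_ is a condition on the input graph: starting from node_id, the parent-successor map
-- (one application = follow one parent pointer; `none` marks a missing key, `some none` a stop
-- at a root) must have reached a stop after parent.length + 1 applications. A stopping chain
-- visits pairwise-distinct positive keys of parent, so that bound is no size restriction:
-- Pre_ holds exactly where Python A returns (elsewhere A raises KeyError on a missing key or
-- loops forever on a parent cycle; nothing A returns on is excluded).
def pvStepChain (parent : List (Int × Option Int)) (edge : List (Int × Option (List Int))) (st : Option (Option Int)) : Option (Option Int) :=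
  match st with
  | some (some cur) =>
    if cur > 0 then
      match (PySem.Dict.mk edge).get? cur, (PySem.Dict.mk parent).get? cur with
      | some _, some (some p) => some (some p)
      | some _, some none => some none   -- parent is None: the walk stops here
      | _, _ => none                     -- missing key: KeyError
    else some none                       -- id ≤ 0: the walk is over
  | st => st                             -- stopped (or failed) states are absorbing

def Pre_path_tokens (node_id : Int) (parent : List (Int × Option Int)) (edge : List (Int × Option (List Int))) : Prop :=
  (pvStepChain parent edge)^[parent.length + 1] (some (some node_id)) = some none

instance (node_id : Int) (parent : List (Int × Option Int)) (edge : List (Int × Option (List Int))) : Decidable (Pre_path_tokens node_id parent edge) := by unfold Pre_path_tokens; infer_instance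

def pvWitness_path_tokens : Int × (List (Int × Option Int)) × (List (Int × Option (List Int))) :=
  (2, [(2, some 1), (1, none)], [(2, some [3, 4]), (1, some [7])])

def Spec_path_tokens (node_id : Int) (parent : List (Int × Option Int)) (edge : List (Int × Option (List Int))) (out : List Int) : Prop := out = path_tokens_alt node_id parent edge
instance (node_id : Int) (parent : List (Int × Option Int)) (edge : List (Int × Option (List Int))) (out : List Int) : Decidable (Spec_path_tokens node_id parent edge out) := by unfold Spec_path_tokens; infer_instance

-- ===== CLAIM (what is proved, stated in full; the proofs are below) =====
def Claim_equal_path_tokens : Prop := ∀ (node_id : Int) (parent : List (Int × Option Int)) (edge : List (Int × Option (List Int))), Dom_path_tokens node_id parent edge → Pre_path_tokens node_id parent edge → Spec_path_tokens node_id parent edge (path_tokens node_id parent edge)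

-- ===== LEMMAS AND PROOFS =====

-- A's loop only appends to its accumulator.
theorem pathLoopA_acc (parent : List (Int × Option Int)) (edge : List (Int × Option (List Int))) :
    ∀ (fuel : Nat) (cur : Int) (segs : List (List Int)),
      pathLoopA parent edge fuel cur segs = segs ++ pathLoopA parent edge fuel cur [] := by
  intro fuel
  induction fuel with
  | zero => intro cur segs; simp [pathLoopA]
  | succ fuel ih =>
    intro cur segs
    by_cases h : cur > 0
    · simp only [pathLoopA, if_pos h]
      cases he : (PySem.Dict.mk edge).get? cur with
      | none => simp
      | some e =>
        cases e with
        | none =>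
          cases hp : (PySem.Dict.mk parent).get? cur with
          | none => simp
          | some po =>
            cases po with
            | none => simp
            | some p => simpa using ih p segs
        | some s =>
          cases hp : (PySem.Dict.mk parent).get? cur with
          | none => simp
          | some po =>
            cases po with
            | none => simp
            | some p =>
              show pathLoopA parent edge fuel p (segs ++ [s]) =
                segs ++ pathLoopA parent edge fuel p ([] ++ [s])
              rw [ih p (segs ++ [s]), ih p ([] ++ [s])]
              simp
    · simp [pathLoopA, if_neg h]

theorem foldl_append_flatten (l : List (List Int)) :
    ∀ acc : List Int, l.foldl (fun out seg => out ++ seg) acc = acc ++ l.flatten := by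
  induction l with
  | nil => intro acc; simp
  | cons x xs ih => intro acc; simp [List.foldl, ih]

-- the parent-successor map is absorbing on non-walking states
theorem pvStepChain_none (parent : List (Int × Option Int)) (edge : List (Int × Option (List Int))) :
    pvStepChain parent edge none = none := rfl

-- core: on a chain admitted by Pre_'s iterate condition, the flattened reversal of A's
-- segment buffer is exactly B's recursion.
theorem loop_eq_rec (parent : List (Int × Option Int)) (edge : List (Int × Option (List Int))) :
    ∀ (fuel : Nat) (cur : Int), cur > 0 →
      (pvStepChain parent edge)^[fuel] (some (some cur)) = some none →
      (pathLoopA parent edge fuel cur []).reverse.flatten = pathRecB parent edge fuel cur := by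
  intro fuel
  induction fuel with
  | zero => intro cur hc hok; simp at hok
  | succ fuel ih =>
    intro cur hc hok
    rw [Function.iterate_succ_apply] at hok
    cases he : (PySem.Dict.mk edge).get? cur with
    | none =>
      simp only [pvStepChain, if_pos hc, he] at hok
      rw [Function.iterate_fixed (pvStepChain_none parent edge)] at hok
      simp at hok
    | some e =>
      cases hp : (PySem.Dict.mk parent).get? cur with
      | none =>
        simp only [pvStepChain, if_pos hc, he, hp] at hok
        rw [Function.iterate_fixed (pvStepChain_none parent edge)] at hok
        simp at hok
      | some po =>
        cases po with
        | none =>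
          -- parent is None: loop stops after this node; B has no ancestor part
          cases e with
          | none => simp [pathLoopA, hc, he, hp, pathRecB]
          | some s => simp [pathLoopA, hc, he, hp, pathRecB]
        | some p =>
          simp only [pvStepChain, if_pos hc, he, hp] at hok
          by_cases hp0 : p > 0
          · have hrec := ih p hp0 hok
            cases e with
            | none =>
              simp only [pathLoopA, if_pos hc, he, hp]
              simpa [pathRecB, hp, he, hp0] using hrec
            | some s =>
              simp only [pathLoopA, if_pos hc, he, hp]
              rw [pathLoopA_acc parent edge fuel p ([] ++ [s])]
              simp [pathRecB, hp, he, hp0, hrec]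
          · have hstop : pathLoopA parent edge fuel p [] = [] := by
              cases fuel <;> simp [pathLoopA, if_neg hp0]
            cases e with
            | none =>
              simp [pathLoopA, hc, he, hp, hstop, pathRecB, hp0]
            | some s =>
              simp only [pathLoopA, if_pos hc, he, hp]
              rw [pathLoopA_acc parent edge fuel p ([] ++ [s]), hstop]
              simp [pathRecB, hp, he, hp0]

-- ===== VERDICT (by name: the statement is the Claim_ definition above) =====
theorem path_tokens_spec : Claim_equal_path_tokens := by
  intro node_id parent edge _hdom hpre
  unfold Spec_path_tokens path_tokens path_tokens_alt
  by_cases h : node_id > 0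
  · rw [if_pos h]
    have := loop_eq_rec parent edge (parent.length + 1) node_id h hpre
    rw [foldl_append_flatten, List.nil_append, this]
  · rw [if_neg h]
    have : pathLoopA parent edge (parent.length + 1) node_id [] = [] := by
      simp [pathLoopA, if_neg h]
    simp [this]
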